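-- pv_equiv track=rewrite | github.com/shamikbose/python_examples | Coding Interview Qs/allPairsLessThanK.py | sortedSolution
-- ===== SOURCE A (Python) =====
-- def sortedSolution(nums: list, k: int)-> (list,int):
-- 	res=[]
-- 	count=0
-- 	nums.sort()
-- 	front,back=0,len(nums)-1
-- 	while(front<back):
-- 		if (nums[front]+nums[back])<k:
-- 			temp=[(nums[front], nums[j]) for  j in range(front+1,back+1)]
-- 			res.extend(temp)
-- 			count+=(back-front)
-- 			front+=1
-- 		else:
-- 			back-=1
-- 	return (res, count)
-- ===== SOURCE B (Python) =====
-- def sortedSolution(nums: list, k: int) -> (list, int):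
--     # Note: like A, this sorts nums in place (observable side effect on the caller's list).
--     nums.sort()
--     n = len(nums)
--     res = [(nums[i], nums[j])
--            for i in range(n)
--            for j in range(i + 1, n)
--            if nums[i] + nums[j] < k]
--     return (res, len(res))
-- ===== Notes on version B (the rewrite author's own statement) =====
-- stated objective: simpler
-- what changed: Replaces the two-pointer shrinking-window loop (which emits whole blocks of pairs and tracks a separate count) with a single nested-comprehension brute-force scan over all i<j pairs, returning len(res) as the count.
import Mathlib
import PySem

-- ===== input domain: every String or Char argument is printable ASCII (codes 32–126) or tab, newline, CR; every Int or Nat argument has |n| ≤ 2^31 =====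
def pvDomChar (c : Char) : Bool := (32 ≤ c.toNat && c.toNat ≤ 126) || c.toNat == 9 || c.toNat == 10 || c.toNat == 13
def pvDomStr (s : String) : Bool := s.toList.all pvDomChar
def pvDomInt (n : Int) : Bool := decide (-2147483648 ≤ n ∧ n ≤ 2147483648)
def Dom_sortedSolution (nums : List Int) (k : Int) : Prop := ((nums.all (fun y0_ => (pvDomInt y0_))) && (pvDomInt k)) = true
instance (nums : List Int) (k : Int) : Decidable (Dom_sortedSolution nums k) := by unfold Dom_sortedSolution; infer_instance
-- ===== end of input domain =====

-- B replaces A's two-pointer shrinking-window loop with a plain brute-force scan of all i<j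
-- pairs of the sorted list (simpler, same result). Both Pythons sort `nums` in place; the
-- equivalence proved here is about the return value.

-- ===== PORT A =====
-- A's while loop, recursion on the window size (back - front). nums[front] / nums[back] / nums[j]
-- are read only when 0 ≤ front < back < len, so every index is in range and pyGetD's default is never used.
def sortedSolutionLoop (l : List Int) (k : Int) (front back : Int)
    (res : List (Int × Int)) (count : Int) : (List (Int × Int)) × Int :=
  if front < back then
    if PySem.List.pyGetD l front 0 + PySem.List.pyGetD l back 0 < k then
      let temp := (PySem.List.pyRange (front + 1) (back + 1) 1).map
        (fun j => (PySem.List.pyGetD l front 0, PySem.List.pyGetD l j 0))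
      sortedSolutionLoop l k (front + 1) back (res ++ temp) (count + (back - front))
    else
      sortedSolutionLoop l k front (back - 1) res count
  else (res, count)
  termination_by (back - front).toNat
  decreasing_by all_goals omega

def sortedSolution (nums : List Int) (k : Int) : (List (Int × Int)) × Int :=
  let l := PySem.List.sorted nums id false
  sortedSolutionLoop l k 0 ((l.length : Int) - 1) [] 0

-- ===== PORT B =====
def sortedSolution_alt (nums : List Int) (k : Int) : (List (Int × Int)) × Int :=
  let s := PySem.List.sorted nums id false
  let n : Int := s.length
  let res := (PySem.List.pyRange 0 n 1).flatMap (fun i =>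
    ((PySem.List.pyRange (i + 1) n 1).filter
        (fun j => decide (PySem.List.pyGetD s i 0 + PySem.List.pyGetD s j 0 < k))).map
      (fun j => (PySem.List.pyGetD s i 0, PySem.List.pyGetD s j 0)))
  (res, (res.length : Int))

-- ===== PRECONDITION & SPEC =====
def Spec_sortedSolution (nums : List Int) (k : Int) (out : (List (Int × Int)) × Int) : Prop := out = sortedSolution_alt nums k
instance (nums : List Int) (k : Int) (out : (List (Int × Int)) × Int) : Decidable (Spec_sortedSolution nums k out) := by unfold Spec_sortedSolution; infer_instance

-- ===== CLAIM (what is proved, stated in full; the proofs are below) =====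
def Claim_equal_sortedSolution : Prop := ∀ (nums : List Int) (k : Int), Dom_sortedSolution nums k → Spec_sortedSolution nums k (sortedSolution nums k)

-- ===== LEMMAS AND PROOFS =====

-- one row of B's comprehension (fixed i), and the brute result from row `front` on
def pvRow (s : List Int) (k i : Int) : List (Int × Int) :=
  ((PySem.List.pyRange (i + 1) (s.length : Int) 1).filter
      (fun j => decide (PySem.List.pyGetD s i 0 + PySem.List.pyGetD s j 0 < k))).map
    (fun j => (PySem.List.pyGetD s i 0, PySem.List.pyGetD s j 0))

def pvBrute (s : List Int) (k front : Int) : List (Int × Int) :=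
  (PySem.List.pyRange front (s.length : Int) 1).flatMap (pvRow s k)

def pvMono (s : List Int) : Prop :=
  ∀ i j : Int, 0 ≤ i → i ≤ j → j < (s.length : Int) →
    PySem.List.pyGetD s i 0 ≤ PySem.List.pyGetD s j 0

lemma pvMono_sorted (nums : List Int) : pvMono (PySem.List.sorted nums id false) := by
  intro i j hi hij hj
  have hp : (PySem.List.sorted nums id false).Pairwise (· ≤ ·) := by
    simpa using PySem.List.sorted_pairwise nums id
  rcases eq_or_lt_of_le hij with rfl | hlt
  · exact le_refl _
  · rw [PySem.List.pyGetD_eq_getElem _ 0 hi (by omega),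
        PySem.List.pyGetD_eq_getElem _ 0 (by omega : (0:Int) ≤ j) (by omega)]
    exact List.pairwise_iff_getElem.mp hp i.toNat j.toNat (by omega) (by omega) (by omega)

lemma pvBrute_empty (s : List Int) (k front back : Int) (hm : pvMono s)
    (hf : 0 ≤ front) (hfb : back ≤ front)
    (Hb : ∀ j : Int, back < j → j < (s.length : Int) →
      ¬ PySem.List.pyGetD s front 0 + PySem.List.pyGetD s j 0 < k) :
    pvBrute s k front = [] := by
  unfold pvBrute
  rw [List.flatMap_eq_nil_iff]
  intro i hi
  have hi' := (PySem.List.mem_pyRange_one).mp hi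
  unfold pvRow
  rw [List.map_eq_nil_iff, List.filter_eq_nil_iff]
  intro j hj
  have hj' := (PySem.List.mem_pyRange_one).mp hj
  have h1 : PySem.List.pyGetD s front 0 ≤ PySem.List.pyGetD s i 0 :=
    hm front i hf (by omega) (by omega)
  have h2 := Hb j (by omega) (by omega)
  simp only [decide_eq_true_eq]
  omega

lemma pvLoop_eq (s : List Int) (k : Int) (hm : pvMono s) :
    ∀ (m : Nat) (front back : Int), (back - front).toNat ≤ m → 0 ≤ front →
      back < (s.length : Int) →
      (∀ j : Int, back < j → j < (s.length : Int) →
        ¬ PySem.List.pyGetD s front 0 + PySem.List.pyGetD s j 0 < k) →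
      ∀ res count, sortedSolutionLoop s k front back res count
        = (res ++ pvBrute s k front, count + ((pvBrute s k front).length : Int)) := by
  intro m
  induction m with
  | zero =>
    intro front back hmea hf hb Hb res count
    rw [sortedSolutionLoop, if_neg (by omega),
        pvBrute_empty s k front back hm hf (by omega) Hb]
    simp
  | succ m ih =>
    intro front back hmea hf hb Hb res count
    by_cases hfb : front < back
    · rw [sortedSolutionLoop, if_pos hfb]
      by_cases hsum : PySem.List.pyGetD s front 0 + PySem.List.pyGetD s back 0 < k
      · rw [if_pos hsum]
        have hrow : pvRow s k front =
            (PySem.List.pyRange (front + 1) (back + 1) 1).map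
              (fun j => (PySem.List.pyGetD s front 0, PySem.List.pyGetD s j 0)) := by
          unfold pvRow
          rw [PySem.List.pyRange_one_append (front + 1) (back + 1) (s.length : Int)
                (by omega) (by omega),
              List.filter_append]
          have h1 : (PySem.List.pyRange (front + 1) (back + 1) 1).filter
              (fun j => decide (PySem.List.pyGetD s front 0 + PySem.List.pyGetD s j 0 < k))
              = PySem.List.pyRange (front + 1) (back + 1) 1 := by
            rw [List.filter_eq_self]
            intro j hj
            have hj' := (PySem.List.mem_pyRange_one).mp hj
            have : PySem.List.pyGetD s j 0 ≤ PySem.List.pyGetD s back 0 :=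
              hm j back (by omega) (by omega) (by omega)
            simp only [decide_eq_true_eq]
            omega
          have h2 : (PySem.List.pyRange (back + 1) (s.length : Int) 1).filter
              (fun j => decide (PySem.List.pyGetD s front 0 + PySem.List.pyGetD s j 0 < k))
              = [] := by
            rw [List.filter_eq_nil_iff]
            intro j hj
            have hj' := (PySem.List.mem_pyRange_one).mp hj
            have := Hb j (by omega) (by omega)
            simp only [decide_eq_true_eq]
            omega
          rw [h1, h2, List.append_nil]
        have hsplit : pvBrute s k front = pvRow s k front ++ pvBrute s k (front + 1) := by
          unfold pvBrute
          rw [PySem.List.pyRange_one_cons (by omega : front < (s.length : Int))]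
          rw [List.flatMap_cons]
        have Hb' : ∀ j : Int, back < j → j < (s.length : Int) →
            ¬ PySem.List.pyGetD s (front + 1) 0 + PySem.List.pyGetD s j 0 < k := by
          intro j h1 h2
          have hmono : PySem.List.pyGetD s front 0 ≤ PySem.List.pyGetD s (front + 1) 0 :=
            hm front (front + 1) hf (by omega) (by omega)
          have := Hb j h1 h2
          omega
        rw [ih (front + 1) back (by omega) (by omega) hb Hb']
        have hlen : ((pvRow s k front).length : Int) = back - front := by
          rw [hrow, List.length_map, PySem.List.length_pyRange_one]
          omega
        rw [hsplit, ← hrow, Prod.mk.injEq]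
        exact ⟨by rw [List.append_assoc], by simp only [List.length_append]; push_cast; omega⟩
      · rw [if_neg hsum]
        have Hb' : ∀ j : Int, back - 1 < j → j < (s.length : Int) →
            ¬ PySem.List.pyGetD s front 0 + PySem.List.pyGetD s j 0 < k := by
          intro j h1 h2
          rcases eq_or_lt_of_le (by omega : back ≤ j) with rfl | hlt
          · exact hsum
          · exact Hb j hlt h2
        exact ih front (back - 1) (by omega) hf (by omega) Hb' res count
    · rw [sortedSolutionLoop, if_neg hfb,
          pvBrute_empty s k front back hm hf (by omega) Hb]
      simp

-- ===== VERDICT (by name: the statement is the Claim_ definition above) =====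
theorem sortedSolution_spec : Claim_equal_sortedSolution := by
  intro nums k _
  unfold Spec_sortedSolution sortedSolution sortedSolution_alt
  set s := PySem.List.sorted nums id false with hs
  have hm : pvMono s := pvMono_sorted nums
  have h := pvLoop_eq s k hm ((((s.length : Int) - 1) - 0).toNat) 0 ((s.length : Int) - 1)
    (le_refl _) (le_refl _) (by omega) (by intro j h1 h2; omega) [] 0
  rw [h]
  simp only [List.nil_append, zero_add]
  rfl
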